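-- pv_equiv track=rewrite | github.com/thiagodiasdigital/ache-sucatas-v13 | local_auditor_v8.py | encontrar_link_leiloeiro
-- ===== SOURCE A (Python) =====
-- from typing import Dict, List, Optional, Set
--
-- KEYWORDS_LEILOEIRO = [
--     # Originais V7.1
--     'leiloeiro', 'leilao', 'lance', 'arrematacao',
--     'superbid', 'sodresantoro', 'zukerman',
--
--     # NOVOS V8 (descobertos pelo Comet)
--     'joaoemilio',
--     'leiloesfreire',
--     'frfreiloes',
--     'leilaobrasil',
--     'leiloes.com',
--     'megaleiloes',
--     'sold',
--     'leilomaster',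
--     'vipleiloes',
--     'leiloesja',
--     'portalleiloes',
-- ]
--
-- def encontrar_link_leiloeiro(urls: List[str]) -> Optional[str]:
--     """
--     Encontra o link do leiloeiro em uma lista de URLs.
--     V8: Keywords expandidas.
--     """
--     if not urls:
--         return None
--
--     # Remover duplicatas mantendo ordem
--     urls_unicas = list(dict.fromkeys(urls))
--
--     # Prioridade 1: Keywords específicas de leiloeiro
--     for url in urls_unicas:
--         url_lower = url.lower()
--         if any(kw in url_lower for kw in KEYWORDS_LEILOEIRO):
--             return url
--
--     # Prioridade 2: .com.br que não seja gov/pncp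
--     for url in urls_unicas:
--         url_lower = url.lower()
--         if '.com' in url_lower and 'gov' not in url_lower and 'pncp' not in url_lower:
--             return url
--
--     return None
-- ===== SOURCE B (Python) =====
-- from typing import List, Optional
--
-- KEYWORDS_LEILOEIRO = [
--     'leiloeiro', 'leilao', 'lance', 'arrematacao',
--     'superbid', 'sodresantoro', 'zukerman',
--     'joaoemilio', 'leiloesfreire', 'frfreiloes', 'leilaobrasil',
--     'leiloes.com', 'megaleiloes', 'sold', 'leilomaster',
--     'vipleiloes', 'leiloesja', 'portalleiloes',
-- ]
--
-- def encontrar_link_leiloeiro(urls: List[str]) -> Optional[str]: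
--     # Single pass, no dedup: order-preserving dedup never changes the first match.
--     cand1 = None  # first url containing an auctioneer keyword
--     cand2 = None  # first '.com' url without 'gov'/'pncp'
--     for url in urls:
--         url_lower = url.lower()
--         if cand1 is None and any(kw in url_lower for kw in KEYWORDS_LEILOEIRO):
--             cand1 = url
--         if cand2 is None and '.com' in url_lower and 'gov' not in url_lower and 'pncp' not in url_lower:
--             cand2 = url
--     return cand1 if cand1 is not None else cand2
-- ===== Notes on version B (the rewrite author's own statement) =====
-- stated objective: alternative
-- what changed: Replaces dedup-then-two-scans with a single pass over the original list that tracks the first priority-1 and priority-2 candidates simultaneously and picks between them at the end.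
import Mathlib
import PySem

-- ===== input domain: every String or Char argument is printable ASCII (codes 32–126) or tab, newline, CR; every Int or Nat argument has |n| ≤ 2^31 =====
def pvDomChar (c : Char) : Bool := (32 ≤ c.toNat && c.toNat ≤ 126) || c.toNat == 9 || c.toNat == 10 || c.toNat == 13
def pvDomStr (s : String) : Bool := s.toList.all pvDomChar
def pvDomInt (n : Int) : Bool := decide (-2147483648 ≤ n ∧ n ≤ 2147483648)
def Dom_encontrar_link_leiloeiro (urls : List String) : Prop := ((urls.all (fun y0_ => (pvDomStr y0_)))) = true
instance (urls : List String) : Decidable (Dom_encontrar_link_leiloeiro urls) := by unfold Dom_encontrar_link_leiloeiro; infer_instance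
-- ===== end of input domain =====

-- B replaces A's dedup-then-two-scans with a single pass tracking both priority candidates.


-- ===== PORT A =====
def KEYWORDS_LEILOEIRO : List String :=
  ["leiloeiro", "leilao", "lance", "arrematacao",
   "superbid", "sodresantoro", "zukerman",
   "joaoemilio", "leiloesfreire", "frfreiloes", "leilaobrasil",
   "leiloes.com", "megaleiloes", "sold", "leilomaster",
   "vipleiloes", "leiloesja", "portalleiloes"]

-- "any(kw in url_lower for kw in KEYWORDS_LEILOEIRO)"
def pvKwMatch (url_lower : String) : Bool :=
  KEYWORDS_LEILOEIRO.any (fun kw => PySem.Str.isIn kw url_lower)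

-- "'.com' in url_lower and 'gov' not in url_lower and 'pncp' not in url_lower"
def pvComMatch (url_lower : String) : Bool :=
  PySem.Str.isIn ".com" url_lower && !PySem.Str.isIn "gov" url_lower
    && !PySem.Str.isIn "pncp" url_lower

def encontrar_link_leiloeiro (urls : List String) : Option String :=
  if urls = [] then none
  else
    let urls_unicas := PySem.List.dedup urls
    match urls_unicas.find? (fun url => pvKwMatch (PySem.Str.lower url)) with
    | some url => some url
    | none => urls_unicas.find? (fun url => pvComMatch (PySem.Str.lower url))

-- ===== PORT B =====
-- single pass: state = (first keyword candidate, first .com candidate)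
def pvStep (acc : Option String × Option String) (url : String) :
    Option String × Option String :=
  let url_lower := PySem.Str.lower url
  ((match acc.1 with
    | some u => some u
    | none => if pvKwMatch url_lower then some url else none),
   (match acc.2 with
    | some u => some u
    | none => if pvComMatch url_lower then some url else none))

def encontrar_link_leiloeiro_alt (urls : List String) : Option String :=
  let st := urls.foldl pvStep (none, none)
  match st.1 with
  | some u => some u
  | none => st.2

-- ===== PRECONDITION & SPEC =====
def Spec_encontrar_link_leiloeiro (urls : List String) (out : Option String) : Prop := out = encontrar_link_leiloeiro_alt urls
instance (urls : List String) (out : Option String) : Decidable (Spec_encontrar_link_leiloeiro urls out) := by unfold Spec_encontrar_link_leiloeiro; infer_instance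

-- ===== CLAIM (what is proved, stated in full; the proofs are below) =====
def Claim_equal_encontrar_link_leiloeiro : Prop := ∀ (urls : List String), Dom_encontrar_link_leiloeiro urls → Spec_encontrar_link_leiloeiro urls (encontrar_link_leiloeiro urls)

-- ===== LEMMAS AND PROOFS =====

-- find? over PySem's order-preserving dedup accumulator
theorem pv_find?_foldl_add {α : Type} [BEq α] [LawfulBEq α] (p : α → Bool)
    (xs : List α) (acc : List α) :
    List.find? p (List.foldl PySem.Set.add acc xs)
      = (List.find? p acc).or (List.find? p xs) := by
  induction xs generalizing acc with
  | nil => simp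
  | cons x xs ih =>
    simp only [List.foldl_cons, ih]
    by_cases hc : PySem.Set.contains acc x
    · rw [show PySem.Set.add acc x = acc from by unfold PySem.Set.add; rw [if_pos hc]]
      have hmem : x ∈ acc := by
        simpa [PySem.Set.contains] using hc
      by_cases hp : p x
      · obtain ⟨y, hy⟩ := Option.isSome_iff_exists.mp
          (List.find?_isSome.mpr ⟨x, hmem, hp⟩)
        simp [hp, hy]
      · simp [hp]
    · rw [show PySem.Set.add acc x = acc ++ [x] from by unfold PySem.Set.add; rw [if_neg hc]]
      rw [List.find?_append]
      by_cases hp : p x <;> cases h : List.find? p acc <;>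
        simp [hp, Option.or]

theorem pv_find?_dedup {α : Type} [BEq α] [LawfulBEq α] (p : α → Bool) (xs : List α) :
    List.find? p (PySem.List.dedup xs) = List.find? p xs := by
  simpa [PySem.List.dedup, PySem.Set.ofList, PySem.Set.empty] using
    pv_find?_foldl_add p xs []

theorem pv_foldl_step (urls : List String) (a b : Option String) :
    urls.foldl pvStep (a, b)
      = (a.or (urls.find? (fun url => pvKwMatch (PySem.Str.lower url))),
         b.or (urls.find? (fun url => pvComMatch (PySem.Str.lower url)))) := by
  induction urls generalizing a b with
  | nil => simp
  | cons u urls ih =>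
    simp only [List.foldl_cons, pvStep, ih, List.find?_cons]
    cases a <;> cases b <;>
      by_cases h1 : pvKwMatch (PySem.Str.lower u) <;>
      by_cases h2 : pvComMatch (PySem.Str.lower u) <;>
      simp [h1, h2, Option.or]

-- ===== VERDICT (by name: the statement is the Claim_ definition above) =====
theorem encontrar_link_leiloeiro_spec : Claim_equal_encontrar_link_leiloeiro := by
  intro urls _
  unfold Spec_encontrar_link_leiloeiro encontrar_link_leiloeiro encontrar_link_leiloeiro_alt
  rw [pv_foldl_step]
  by_cases he : urls = []
  · subst he; simp
  · simp only [he, if_false, pv_find?_dedup]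
    cases h1 : urls.find? (fun url => pvKwMatch (PySem.Str.lower url)) <;>
      simp [Option.or]
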